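-- pv_equiv track=rewrite | github.com/raphaelxie/Generative_Agent_Cognitive_Network | reverie/backend_server/self_position_calibration.py | _rank_desc
-- ===== SOURCE A (Python) =====
-- def _rank_desc(values_by_name):
--     ordered = sorted(values_by_name.items(), key=lambda kv: (-kv[1], kv[0]))
--     out = {}
--     rank = 1
--     for name, val in ordered:
--         out[name] = rank
--         rank += 1
--     return out
-- ===== SOURCE B (Python) =====
-- def _rank_desc(values_by_name):
--     items = list(values_by_name.items())
--     slots = [None] * len(items)
--     for name, val in items:
--         c = sum(1 for n2, v2 in items if v2 > val or (v2 == val and n2 < name))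
--         slots[c] = (name, c + 1)
--     return dict(slots)
-- ===== Notes on version B (the rewrite author's own statement) =====
-- stated objective: alternative
-- what changed: B computes each item's rank directly by counting how many other items outrank it (v2 > v, or v2 == v and n2 < n) and places the pair straight into its rank slot, instead of A's sort-then-enumerate; no sorting at all.
import Mathlib
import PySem

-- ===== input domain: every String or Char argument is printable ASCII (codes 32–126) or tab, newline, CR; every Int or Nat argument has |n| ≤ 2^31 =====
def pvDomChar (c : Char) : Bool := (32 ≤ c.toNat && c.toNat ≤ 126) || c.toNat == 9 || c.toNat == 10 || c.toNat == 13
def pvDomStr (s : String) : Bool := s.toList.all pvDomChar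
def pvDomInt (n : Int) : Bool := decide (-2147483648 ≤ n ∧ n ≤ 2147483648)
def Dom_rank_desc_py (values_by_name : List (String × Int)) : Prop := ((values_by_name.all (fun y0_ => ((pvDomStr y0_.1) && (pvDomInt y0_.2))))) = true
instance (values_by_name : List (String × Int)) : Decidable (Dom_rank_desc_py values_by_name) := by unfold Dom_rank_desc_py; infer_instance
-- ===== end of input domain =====

-- B assigns each rank by comparison-counting (placing each item directly at its rank slot)
-- instead of A's sort-then-enumerate (objective: alternative; B is quadratic, not faster).

-- ===== PORT A =====
-- ordered = sorted(values_by_name.items(), key=lambda kv: (-kv[1], kv[0]));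
-- out = {}; rank = 1; for name, val in ordered: out[name] = rank; rank += 1; return out
def rank_desc_py (values_by_name : List (String × Int)) : List (String × Int) :=
  let ordered := PySem.List.sorted2 values_by_name (fun kv => -kv.2) (fun kv => kv.1)
  let st := ordered.foldl
    (fun (st : PySem.Dict String Int × Int) kv => (st.1.insert kv.1 st.2, st.2 + 1))
    (PySem.Dict.empty, 1)
  st.1.items

-- ===== PORT B =====
-- items = list(values_by_name.items()); slots = [None]*len(items);
-- for name, val in items: c = sum(1 for n2, v2 in items if v2 > val or (v2 == val and n2 < name));
--   slots[c] = (name, c+1); return dict(slots)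
-- (c < len(items) always holds, so List.set is exact for slots[c] = …; the `none` branch of the
--  final dict(...) fold is unreachable under Pre_, where every slot has been filled.)
def rank_desc_py_alt (values_by_name : List (String × Int)) : List (String × Int) :=
  let items := values_by_name
  let slots := items.foldl
    (fun (slots : List (Option (String × Int))) kv =>
      let c := items.countP (fun kv2 => kv2.2 > kv.2 || (kv2.2 == kv.2 && kv2.1 < kv.1))
      slots.set c (some (kv.1, (c : Int) + 1)))
    (List.replicate items.length none)
  (slots.foldl
    (fun (d : PySem.Dict String Int) o =>
      match o with
      | some kv => d.insert kv.1 kv.2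
      | none => d)
    PySem.Dict.empty).items

-- ===== PRECONDITION & SPEC =====
-- Pre_ requires the names (keys) to be pairwise distinct: the argument is a Python dict, and an
-- association list with duplicate keys does not represent any dict, so nothing is claimed there.
def Pre_rank_desc_py (values_by_name : List (String × Int)) : Prop :=
  (values_by_name.map Prod.fst).Nodup
instance (values_by_name : List (String × Int)) : Decidable (Pre_rank_desc_py values_by_name) := by
  unfold Pre_rank_desc_py; infer_instance

def pvWitness_rank_desc_py : (List (String × Int)) := [("alice", 3), ("bob", 7), ("carol", 3)]

def Spec_rank_desc_py (values_by_name : List (String × Int)) (out : List (String × Int)) : Prop := out = rank_desc_py_alt values_by_name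
instance (values_by_name : List (String × Int)) (out : List (String × Int)) : Decidable (Spec_rank_desc_py values_by_name out) := by unfold Spec_rank_desc_py; infer_instance

-- ===== CLAIM (what is proved, stated in full; the proofs are below) =====
def Claim_equal_rank_desc_py : Prop := ∀ (values_by_name : List (String × Int)), Dom_rank_desc_py values_by_name → Pre_rank_desc_py values_by_name → Spec_rank_desc_py values_by_name (rank_desc_py values_by_name)

-- ===== LEMMAS AND PROOFS =====

-- the sort key as a single lexicographic key
def pvKey (kv : String × Int) : Int ×ₗ String := toLex (-kv.2, kv.1)

theorem pvKey_inj : Function.Injective pvKey := by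
  intro a b h
  unfold pvKey at h
  have h' := congrArg (fun x => ofLex x) h
  simp at h'
  obtain ⟨h1, h2⟩ := h'
  exact Prod.ext h2 (by omega)

theorem sorted2_eq_sorted_key (xs : List (String × Int)) :
    PySem.List.sorted2 xs (fun kv => -kv.2) (fun kv => kv.1) = PySem.List.sorted xs pvKey := by
  unfold PySem.List.sorted2 PySem.List.sorted
  simp only
  congr 1
  funext acc x
  congr 1
  funext a b
  unfold pvKey
  rcases lt_trichotomy (-a.2) (-b.2) with h|h|h <;>
    simp [Prod.Lex.lt_iff, h, not_lt_of_gt]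

-- the Python boolean "outranks" test is exactly pvKey-strictly-less
theorem outranks_iff (a b : String × Int) :
    (a.2 > b.2 || (a.2 == b.2 && a.1 < b.1)) = decide (pvKey a < pvKey b) := by
  unfold pvKey
  rcases lt_trichotomy a.2 b.2 with h|h|h <;>
    simp [Prod.Lex.lt_iff, h, not_lt_of_gt] <;> omega

-- in a pvKey-strictly-increasing list, the count of elements below s[j] is j
theorem countP_lt_of_pairwise (s : List (String × Int))
    (h : s.Pairwise (fun a b => pvKey a < pvKey b)) (j : Nat) (hj : j < s.length) :
    s.countP (fun y => decide (pvKey y < pvKey s[j])) = j := by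
  induction s generalizing j with
  | nil => simp at hj
  | cons a t ih =>
    rcases List.pairwise_cons.mp h with ⟨ha, ht⟩
    cases j with
    | zero =>
      simp only [List.getElem_cons_zero, List.countP_cons]
      rw [List.countP_eq_zero.mpr]
      · simp
      · intro y hy
        simp only [decide_eq_true_eq]
        exact not_lt_of_gt (ha y hy)
    | succ j =>
      have hj' : j < t.length := by simpa using hj
      simp only [List.getElem_cons_succ, List.countP_cons]
      have hmem : t[j] ∈ t := List.getElem_mem hj'
      have hih := ih ht j hj'
      simp only [ha _ hmem, decide_true, if_pos]
      exact congrArg (· + 1) hih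

-- the "rank list": ranks r, r+1, … attached to the names of s in order
def pvRList (s : List (String × Int)) (r : Int) : List (String × Int) :=
  match s with
  | [] => []
  | kv :: t => (kv.1, r) :: pvRList t (r + 1)

theorem pvRList_length (s : List (String × Int)) (r : Int) : (pvRList s r).length = s.length := by
  induction s generalizing r with
  | nil => rfl
  | cons a t ih => simp [pvRList, ih]

theorem pvRList_map_fst (s : List (String × Int)) (r : Int) :
    (pvRList s r).map Prod.fst = s.map Prod.fst := by
  induction s generalizing r with
  | nil => rfl
  | cons a t ih => simp [pvRList, ih]

theorem pvRList_getElem (s : List (String × Int)) (r : Int) (j : Nat) (hj : j < s.length) :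
    (pvRList s r)[j]'(by rw [pvRList_length]; exact hj) = (s[j].1, r + j) := by
  induction s generalizing r j with
  | nil => simp at hj
  | cons a t ih =>
    cases j with
    | zero => simp [pvRList]
    | succ j =>
      have := ih (r + 1) j (by simpa using Nat.lt_of_succ_lt_succ hj)
      simp only [pvRList, List.getElem_cons_succ, this]
      congr 1
      push_cast
      ring

-- A's loop: with fresh, pairwise-distinct names, it appends (name, rank) pairs to the dict
theorem A_loop (s : List (String × Int)) (d : PySem.Dict String Int) (r : Int)
    (hfresh : ∀ kv ∈ s, d.contains kv.1 = false) (hnd : (s.map Prod.fst).Nodup) :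
    ((s.foldl (fun (st : PySem.Dict String Int × Int) kv => (st.1.insert kv.1 st.2, st.2 + 1))
      (d, r)).1).items = d.items ++ pvRList s r := by
  induction s generalizing d r with
  | nil => simp [pvRList]
  | cons kv t ih =>
    simp only [List.foldl_cons]
    rw [ih (d.insert kv.1 r) (r + 1) ?_ ?_]
    · rw [PySem.Dict.items_insert_of_not_contains d (k := kv.1) r (hfresh kv (List.mem_cons_self))]
      simp [pvRList]
    · intro kv2 h2
      rw [PySem.Dict.contains_insert]
      have hne : kv2.1 ≠ kv.1 := by
        simp only [List.map_cons, List.nodup_cons] at hnd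
        intro he
        exact hnd.1 (he ▸ List.mem_map_of_mem h2)
      simp [hne, hfresh kv2 (List.mem_cons_of_mem _ h2)]
    · simp only [List.map_cons, List.nodup_cons] at hnd
      exact hnd.2

-- B's final loop: folding dict-insert over a list of `some` pairs with fresh, distinct names
theorem B_dict_loop (l : List (String × Int)) (d : PySem.Dict String Int)
    (hfresh : ∀ kv ∈ l, d.contains kv.1 = false) (hnd : (l.map Prod.fst).Nodup) :
    ((l.map some).foldl
      (fun (d : PySem.Dict String Int) o =>
        match o with
        | some kv => d.insert kv.1 kv.2
        | none => d) d).items = d.items ++ l := by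
  induction l generalizing d with
  | nil => simp
  | cons kv t ih =>
    simp only [List.map_cons, List.foldl_cons]
    rw [ih (d.insert kv.1 kv.2) ?_ ?_]
    · rw [PySem.Dict.items_insert_of_not_contains d (k := kv.1) kv.2 (hfresh kv (List.mem_cons_self))]
      simp
    · intro kv2 h2
      rw [PySem.Dict.contains_insert]
      have hne : kv2.1 ≠ kv.1 := by
        simp only [List.map_cons, List.nodup_cons] at hnd
        intro he
        exact hnd.1 (he ▸ List.mem_map_of_mem h2)
      simp [hne, hfresh kv2 (List.mem_cons_of_mem _ h2)]
    · simp only [List.map_cons, List.nodup_cons] at hnd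
      exact hnd.2

-- the count for an element kv ∈ xs equals its index in the sorted list s
theorem count_eq_index (xs s : List (String × Int)) (hperm : s.Perm xs)
    (hpair : s.Pairwise (fun a b => pvKey a < pvKey b)) (j : Nat) (hj : j < s.length) :
    xs.countP (fun kv2 => kv2.2 > s[j].2 || (kv2.2 == s[j].2 && kv2.1 < s[j].1)) = j := by
  have h1 : xs.countP (fun kv2 => kv2.2 > s[j].2 || (kv2.2 == s[j].2 && kv2.1 < s[j].1))
      = xs.countP (fun y => decide (pvKey y < pvKey s[j])) := by
    apply List.countP_congr
    intro y _
    rw [outranks_iff]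
  rw [h1, ← hperm.countP_eq]
  exact countP_lt_of_pairwise s hpair j hj

-- B's slot-filling loop, with processed prefix p
theorem B_slots_loop (xs : List (String × Int)) (s : List (String × Int))
    (hperm : s.Perm xs) (hpair : s.Pairwise (fun a b => pvKey a < pvKey b))
    (hnd : s.Nodup) :
    ∀ (rest p : List (String × Int)), xs = p ++ rest →
    (rest.foldl
      (fun (slots : List (Option (String × Int))) kv =>
        let c := xs.countP (fun kv2 => kv2.2 > kv.2 || (kv2.2 == kv.2 && kv2.1 < kv.1))
        slots.set c (some (kv.1, (c : Int) + 1)))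
      (s.map (fun y => if y ∈ p then
        some (y.1, (xs.countP (fun kv2 => kv2.2 > y.2 || (kv2.2 == y.2 && kv2.1 < y.1)) : Int) + 1)
        else none)))
    = s.map (fun y => if y ∈ p ++ rest then
        some (y.1, (xs.countP (fun kv2 => kv2.2 > y.2 || (kv2.2 == y.2 && kv2.1 < y.1)) : Int) + 1)
        else none) := by
  intro rest
  induction rest with
  | nil => intro p hxs; simp
  | cons kv rest ih =>
    intro p hxs
    simp only [List.foldl_cons]
    have hkv_xs : kv ∈ xs := by rw [hxs]; exact List.mem_append_right _ List.mem_cons_self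
    have hkv_s : kv ∈ s := hperm.mem_iff.mpr hkv_xs
    obtain ⟨j, hj, hsj⟩ := List.getElem_of_mem hkv_s
    have hc : xs.countP (fun kv2 => kv2.2 > kv.2 || (kv2.2 == kv.2 && kv2.1 < kv.1)) = j := by
      have h := count_eq_index xs s hperm hpair j hj
      rw [hsj] at h; exact h
    have hstep : ((s.map (fun y => if y ∈ p then
        some (y.1, (xs.countP (fun kv2 => kv2.2 > y.2 || (kv2.2 == y.2 && kv2.1 < y.1)) : Int) + 1)
        else none)).set
          (xs.countP (fun kv2 => kv2.2 > kv.2 || (kv2.2 == kv.2 && kv2.1 < kv.1)))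
          (some (kv.1, ((xs.countP (fun kv2 => kv2.2 > kv.2 || (kv2.2 == kv.2 && kv2.1 < kv.1)) : Int)) + 1)))
        = s.map (fun y => if y ∈ p ++ [kv] then
        some (y.1, (xs.countP (fun kv2 => kv2.2 > y.2 || (kv2.2 == y.2 && kv2.1 < y.1)) : Int) + 1)
        else none) := by
      apply List.ext_getElem?
      intro i
      rw [List.getElem?_set]
      by_cases hij : xs.countP (fun kv2 => kv2.2 > kv.2 || (kv2.2 == kv.2 && kv2.1 < kv.1)) = i
      · rw [if_pos hij, if_pos (by rw [List.length_map]; omega)]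
        have hij2 : i = j := by omega
        subst hij2
        rw [List.getElem?_map, List.getElem?_eq_getElem hj, Option.map_some, hsj,
          if_pos (List.mem_append_right _ List.mem_cons_self)]
      · rw [if_neg hij]
        simp only [List.getElem?_map]
        rcases Nat.lt_or_ge i s.length with hi | hi
        · have hne : s[i] ≠ kv := by
            intro he
            apply hij
            rw [hc]
            have hii : s[i] = s[j] := by rw [he, hsj]
            exact ((List.Nodup.getElem_inj_iff hnd).mp hii).symm ▸ rfl
          rw [List.getElem?_eq_getElem hi]
          simp only [Option.map_some]
          have hmm : s[i] ∈ p ++ [kv] ↔ s[i] ∈ p := by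
            simp [hne]
          simp only [hmm]
        · rw [List.getElem?_eq_none (by simpa using hi)]
          rfl
    rw [hstep, ih (p ++ [kv]) (by rw [hxs, List.append_assoc]; rfl)]
    rw [List.append_assoc]
    rfl

-- ===== VERDICT (by name: the statement is the Claim_ definition above) =====
theorem rank_desc_py_spec : Claim_equal_rank_desc_py := by
  intro xs _ hpre
  unfold Spec_rank_desc_py rank_desc_py rank_desc_py_alt
  simp only [sorted2_eq_sorted_key]
  have hperm : (PySem.List.sorted xs pvKey).Perm xs := PySem.List.sorted_perm xs pvKey _
  set s := PySem.List.sorted xs pvKey with hs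
  have hnames : (s.map Prod.fst).Nodup := ((hperm.map Prod.fst).nodup_iff).mpr hpre
  have hnd : s.Nodup := List.Nodup.of_map Prod.fst hnames
  have hle : s.Pairwise (fun a b => pvKey a ≤ pvKey b) := PySem.List.sorted_pairwise xs pvKey
  have hpair : s.Pairwise (fun a b => pvKey a < pvKey b) := by
    exact (List.Pairwise.and hle hnd).imp
      (fun hab => lt_of_le_of_ne hab.1 (fun he => hab.2 (pvKey_inj he)))
  have hA := A_loop s PySem.Dict.empty 1 (fun kv _ => PySem.Dict.contains_empty kv.1) hnames
  have hinit : (List.replicate xs.length (none : Option (String × Int)))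
      = s.map (fun y => if y ∈ ([] : List (String × Int)) then
        some (y.1, (xs.countP (fun kv2 => kv2.2 > y.2 || (kv2.2 == y.2 && kv2.1 < y.1)) : Int) + 1)
        else none) := by
    simp [List.map_const', hperm.length_eq]
  have hB := B_slots_loop xs s hperm hpair hnd xs [] rfl
  have hmap : (s.map (fun y => if y ∈ ([] : List (String × Int)) ++ xs then
        some (y.1, (xs.countP (fun kv2 => kv2.2 > y.2 || (kv2.2 == y.2 && kv2.1 < y.1)) : Int) + 1)
        else none)) = (pvRList s 1).map some := by
    apply List.ext_getElem?
    intro i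
    rcases Nat.lt_or_ge i s.length with hi | hi
    · have hi' : i < (pvRList s 1).length := by rw [pvRList_length]; exact hi
      rw [List.getElem?_map, List.getElem?_map, List.getElem?_eq_getElem hi,
        List.getElem?_eq_getElem hi']
      simp only [Option.map_some]
      have hmem : s[i] ∈ ([] : List (String × Int)) ++ xs :=
        List.mem_append_right _ (hperm.subset (List.getElem_mem hi))
      rw [if_pos hmem, pvRList_getElem s 1 i hi, count_eq_index xs s hperm hpair i hi]
      norm_num [add_comm]
    · rw [List.getElem?_eq_none (by simpa using hi),
        List.getElem?_eq_none (by rw [List.length_map, pvRList_length]; exact hi)]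
  have hBd := B_dict_loop (pvRList s 1) PySem.Dict.empty
    (fun kv _ => PySem.Dict.contains_empty kv.1)
    (by rw [pvRList_map_fst]; exact hnames)
  rw [hA, hinit, hB, hmap, hBd]
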